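-- pv_equiv track=rewrite | github.com/ruke47/advent-of-code-2020 | 14/2.py | calculate_masks
-- ===== SOURCE A (Python) =====
-- def calculate_masks(mask_str):
--     ones_mask = 0
--     floating_idx = []
--     for i, char in enumerate(mask_str[::-1]):
--         if char == "1":
--             ones_mask += 2**i
--         elif char == "X":
--             floating_idx.append(i)
--     return (ones_mask, floating_idx)
-- ===== SOURCE B (Python) =====
-- def calculate_masks(mask_str):
--     # Horner conversion of the '1' bits (like int(bits, 2)); everything not '1' counts as 0.
--     bits = ''.join('1' if c == '1' else '0' for c in mask_str)
--     ones_mask = 0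
--     for c in bits:
--         ones_mask = ones_mask * 2 + (1 if c == '1' else 0)
--     n = len(mask_str)
--     floating_idx = [n - 1 - i for i, c in enumerate(mask_str) if c == 'X'][::-1]
--     return (ones_mask, floating_idx)
-- ===== Notes on version B (the rewrite author's own statement) =====
-- stated objective: idiomatic
-- what changed: B scans the string forward: the ones-mask is built by Horner base-2 conversion (acc*2+bit) instead of summing 2**i over the reversed string, and the floating indices come from a forward comprehension with index arithmetic (n-1-i) reversed at the end, instead of being appended inside the reverse loop.
import Mathlib
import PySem

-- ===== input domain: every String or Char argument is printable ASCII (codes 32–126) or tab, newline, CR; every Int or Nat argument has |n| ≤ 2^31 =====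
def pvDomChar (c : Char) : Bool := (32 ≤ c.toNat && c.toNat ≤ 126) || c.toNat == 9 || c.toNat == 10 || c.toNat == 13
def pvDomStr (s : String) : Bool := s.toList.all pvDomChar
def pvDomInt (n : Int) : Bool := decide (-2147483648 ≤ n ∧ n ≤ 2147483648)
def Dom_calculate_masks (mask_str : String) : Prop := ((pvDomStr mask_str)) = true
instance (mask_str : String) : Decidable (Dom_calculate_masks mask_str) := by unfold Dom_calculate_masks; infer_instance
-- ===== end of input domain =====

-- B replaces A's reversed-scan bit accumulation by a forward Horner base-2 conversion plus a
-- forward index comprehension reversed at the end (idiomatic restructuring; same cost).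

-- ===== PORT A =====
-- for i, char in enumerate(mask_str[::-1]): accumulate 2**i on '1', append i on 'X'
def calculate_masks (mask_str : String) : Int × List Int :=
  (PySem.List.enumerate mask_str.toList.reverse).foldl
    (fun st p =>
      if p.2 = '1' then (st.1 + 2 ^ p.1.toNat, st.2)
      else if p.2 = 'X' then (st.1, st.2 ++ [p.1])
      else st)
    (0, [])

-- ===== PORT B =====
-- bits = ''.join('1' if c=='1' else '0' for c in s); Horner loop acc*2+bit (hand port of the
-- base-2 conversion loop in Source B, exact on '0'/'1' characters); floats by forward comprehension.
def calculate_masks_alt (mask_str : String) : Int × List Int :=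
  let bits := mask_str.toList.map (fun c => if c = '1' then '1' else '0')
  let ones := bits.foldl (fun acc c => acc * 2 + (if c = '1' then 1 else 0)) (0 : Int)
  let n : Int := mask_str.toList.length
  let fl := (((PySem.List.enumerate mask_str.toList).filter (fun p => p.2 == 'X')).map
      (fun p => n - 1 - p.1)).reverse
  (ones, fl)

-- ===== PRECONDITION & SPEC =====
def Spec_calculate_masks (mask_str : String) (out : Int × List Int) : Prop := out = calculate_masks_alt mask_str
instance (mask_str : String) (out : Int × List Int) : Decidable (Spec_calculate_masks mask_str out) := by unfold Spec_calculate_masks; infer_instance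

-- ===== CLAIM (what is proved, stated in full; the proofs are below) =====
def Claim_equal_calculate_masks : Prop := ∀ (mask_str : String), Dom_calculate_masks mask_str → Spec_calculate_masks mask_str (calculate_masks mask_str)

-- ===== LEMMAS AND PROOFS =====

-- A's fold over the enumerated reversed character list
def pvAstep : Int × List Int → Int × Char → Int × List Int :=
  fun st p =>
    if p.2 = '1' then (st.1 + 2 ^ p.1.toNat, st.2)
    else if p.2 = 'X' then (st.1, st.2 ++ [p.1])
    else st

def pvAcore (L : List Char) : Int × List Int :=
  (PySem.List.enumerate L.reverse).foldl pvAstep (0, [])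

def pvHstep : Int → Char → Int := fun acc c => acc * 2 + (if c = '1' then 1 else 0)

def pvOnes (L : List Char) : Int :=
  (L.map (fun c => if c = '1' then '1' else '0')).foldl pvHstep 0

def pvFloats (L : List Char) : List Int :=
  (((PySem.List.enumerate L).filter (fun p => p.2 == 'X')).map
      (fun p => (L.length : Int) - 1 - p.1)).reverse

theorem pvHorner_init (l : List Char) (a : Int) :
    l.foldl pvHstep a = a * 2 ^ l.length + l.foldl pvHstep 0 := by
  induction l generalizing a with
  | nil => simp
  | cons c l ih =>
    simp only [List.foldl_cons, List.length_cons]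
    rw [ih (pvHstep a c), ih (pvHstep 0 c)]
    simp only [pvHstep]
    split_ifs <;> ring

theorem pvEnum_shift (l : List Char) (s : Int) :
    PySem.List.enumerate l (s + 1) = (PySem.List.enumerate l s).map (fun p => (p.1 + 1, p.2)) := by
  induction l generalizing s with
  | nil => simp [PySem.List.enumerate_nil]
  | cons c l ih =>
    rw [PySem.List.enumerate_cons, PySem.List.enumerate_cons, List.map_cons, ih (s + 1)]

theorem pvOnes_cons (c : Char) (L : List Char) :
    pvOnes (c :: L) = (if c = '1' then (2 : Int) ^ L.length else 0) + pvOnes L := by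
  simp only [pvOnes, List.map_cons, List.foldl_cons]
  rw [pvHorner_init]
  by_cases h : c = '1' <;> simp [h, pvHstep]

theorem pvFloats_cons (c : Char) (L : List Char) :
    pvFloats (c :: L) = pvFloats L ++ (if c = 'X' then [(L.length : Int)] else []) := by
  simp only [pvFloats, PySem.List.enumerate_cons]
  rw [show (0 : Int) + 1 = 0 + 1 by ring, pvEnum_shift]
  by_cases h : c = 'X' <;>
    simp [h, List.filter_map, List.map_map] <;>
    · congr 1
      funext p
      simp only [Function.comp]
      ring

theorem pvMain (L : List Char) : pvAcore L = (pvOnes L, pvFloats L) := by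
  induction L with
  | nil => simp [pvAcore, pvOnes, pvFloats, PySem.List.enumerate_nil]
  | cons c L ih =>
    have hlen : L.reverse.length = L.length := by simp
    simp only [pvAcore, List.reverse_cons, PySem.List.enumerate_append, List.foldl_append, hlen,
      PySem.List.enumerate_cons, PySem.List.enumerate_nil, List.foldl_cons, List.foldl_nil]
    rw [show (PySem.List.enumerate L.reverse).foldl pvAstep (0, []) = pvAcore L from rfl, ih]
    rw [pvOnes_cons, pvFloats_cons]
    by_cases h : c = '1'
    · simp [pvAstep, h]
      ring
    · by_cases h2 : c = 'X' <;> simp [pvAstep, h, h2]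

-- ===== VERDICT (by name: the statement is the Claim_ definition above) =====
theorem calculate_masks_spec : Claim_equal_calculate_masks := by
  intro s _
  show calculate_masks s = calculate_masks_alt s
  have := pvMain s.toList
  simpa [calculate_masks, calculate_masks_alt, pvAcore, pvAstep, pvOnes, pvHstep, pvFloats] using this
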